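-- pv_equiv track=rewrite | github.com/tzellas/predictive_process_mining_rag | src/evaluation.py | _per_label_counts
-- ===== SOURCE A (Python) =====
-- def _per_label_counts(y_true: list[str], y_pred: list[str | None], label: str) -> tuple[int, int, int]:
--     tp = fp = fn = 0
--     for gold, pred in zip(y_true, y_pred):
--         if pred == label and gold == label:
--             tp += 1
--         elif pred == label and gold != label:
--             fp += 1
--         elif pred != label and gold == label:
--             fn += 1
--     return tp, fp, fn
-- ===== SOURCE B (Python) =====
-- def _per_label_counts(y_true: list[str], y_pred: list[str | None], label: str) -> tuple[int, int, int]: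
--     pairs = list(zip(y_true, y_pred))
--     tp = sum(1 for g, p in pairs if g == label and p == label)
--     pred_pos = sum(1 for _, p in pairs if p == label)
--     gold_pos = sum(1 for g, _ in pairs if g == label)
--     return tp, pred_pos - tp, gold_pos - tp
-- ===== Notes on version B (the rewrite author's own statement) =====
-- stated objective: alternative
-- what changed: Replaces the per-element tp/fp/fn elif branching with counting tp, predicted positives and gold positives over the zipped pairs and deriving fp and fn by subtraction.
import Mathlib
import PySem

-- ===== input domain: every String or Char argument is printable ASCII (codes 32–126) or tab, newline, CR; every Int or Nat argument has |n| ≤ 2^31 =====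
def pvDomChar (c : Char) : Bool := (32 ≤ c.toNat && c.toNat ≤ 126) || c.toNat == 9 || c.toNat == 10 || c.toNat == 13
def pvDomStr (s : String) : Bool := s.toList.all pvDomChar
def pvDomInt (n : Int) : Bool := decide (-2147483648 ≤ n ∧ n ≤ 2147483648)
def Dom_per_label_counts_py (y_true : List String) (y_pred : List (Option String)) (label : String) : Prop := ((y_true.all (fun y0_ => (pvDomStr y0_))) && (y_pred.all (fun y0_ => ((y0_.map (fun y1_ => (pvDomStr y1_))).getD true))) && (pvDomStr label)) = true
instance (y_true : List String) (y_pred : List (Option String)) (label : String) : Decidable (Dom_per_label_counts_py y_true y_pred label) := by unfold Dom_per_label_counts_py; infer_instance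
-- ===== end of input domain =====

-- B counts tp / predicted positives / gold positives over the zipped pairs and derives fp, fn by subtraction (alternative decomposition; same cost).

-- ===== PORT A =====
def per_label_counts_py (y_true : List String) (y_pred : List (Option String)) (label : String) : Int × Int × Int :=
  (y_true.zip y_pred).foldl
    (fun (s : Int × Int × Int) gp =>
      if gp.2 == some label && gp.1 == label then (s.1 + 1, s.2.1, s.2.2)
      else if gp.2 == some label && !(gp.1 == label) then (s.1, s.2.1 + 1, s.2.2)
      else if !(gp.2 == some label) && gp.1 == label then (s.1, s.2.1, s.2.2 + 1)
      else s)
    (0, 0, 0)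

-- ===== PORT B =====
def per_label_counts_py_alt (y_true : List String) (y_pred : List (Option String)) (label : String) : Int × Int × Int :=
  let pairs := y_true.zip y_pred
  let tp : Int := (pairs.countP (fun gp => gp.1 == label && gp.2 == some label) : Int)
  let predPos : Int := (pairs.countP (fun gp => gp.2 == some label) : Int)
  let goldPos : Int := (pairs.countP (fun gp => gp.1 == label) : Int)
  (tp, predPos - tp, goldPos - tp)

-- ===== PRECONDITION & SPEC =====
def Spec_per_label_counts_py (y_true : List String) (y_pred : List (Option String)) (label : String) (out : Int × Int × Int) : Prop := out = per_label_counts_py_alt y_true y_pred label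
instance (y_true : List String) (y_pred : List (Option String)) (label : String) (out : Int × Int × Int) : Decidable (Spec_per_label_counts_py y_true y_pred label out) := by unfold Spec_per_label_counts_py; infer_instance

-- ===== CLAIM (what is proved, stated in full; the proofs are below) =====
def Claim_equal_per_label_counts_py : Prop := ∀ (y_true : List String) (y_pred : List (Option String)) (label : String), Dom_per_label_counts_py y_true y_pred label → Spec_per_label_counts_py y_true y_pred label (per_label_counts_py y_true y_pred label)

-- ===== LEMMAS AND PROOFS =====

theorem plc_foldl_counts (label : String) (l : List (String × Option String)) (tp fp fn : Int) :
    l.foldl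
      (fun (s : Int × Int × Int) gp =>
        if gp.2 == some label && gp.1 == label then (s.1 + 1, s.2.1, s.2.2)
        else if gp.2 == some label && !(gp.1 == label) then (s.1, s.2.1 + 1, s.2.2)
        else if !(gp.2 == some label) && gp.1 == label then (s.1, s.2.1, s.2.2 + 1)
        else s)
      (tp, fp, fn)
    = (tp + (l.countP (fun gp => gp.1 == label && gp.2 == some label) : Int),
       fp + (l.countP (fun gp => gp.2 == some label) : Int)
          - (l.countP (fun gp => gp.1 == label && gp.2 == some label) : Int),
       fn + (l.countP (fun gp => gp.1 == label) : Int)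
          - (l.countP (fun gp => gp.1 == label && gp.2 == some label) : Int)) := by
  induction l generalizing tp fp fn with
  | nil => simp
  | cons hd tl ih =>
    simp only [List.foldl_cons, List.countP_cons]
    by_cases hg : hd.1 == label <;> by_cases hp : hd.2 == some label <;>
      simp only [hg, hp, Bool.and_true, Bool.true_and, Bool.and_false, Bool.false_and,
        Bool.not_true, Bool.not_false, if_true, if_false, ite_true] <;>
      rw [ih] <;> simp [Prod.ext_iff] <;> omega

-- ===== VERDICT (by name: the statement is the Claim_ definition above) =====
theorem per_label_counts_py_spec : Claim_equal_per_label_counts_py := by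
  intro y_true y_pred label _
  unfold Spec_per_label_counts_py per_label_counts_py per_label_counts_py_alt
  rw [plc_foldl_counts]
  simp
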